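-- pv_equiv track=rewrite | github.com/psychopy/psychopy | psychopy/tools/stringtools.py | makeValidVarName
-- ===== SOURCE A (Python) =====
-- def makeValidVarName(name, case="camel"):
--     """
--     Transform a string into a valid variable name
--
--     Parameters
--     ----------
--     name : str
--         Original name to be transformed
--     case : str
--         Case style for variable name to be in. Options are:
--         upper: UPPERCASE
--         title: TitleCase
--         camel: camelCase
--         snake: snake_case
--         lower: lowercase
--     """
--     # Mark which underscores which need preserving
--     private = name.startswith("_")
--     protected = name.startswith("__")
--     core = name.endswith("__")
--     # Replace all different wordbreaks with _
--     for wb in (" ", ".", ","):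
--         name = name.replace(wb, "_")
--     # Insert a _ between lower/upper pairs and char/number pairs
--     lastChar = ""
--     processed = ""
--     for c in name:
--         # Insert a _ if...
--         if any([
--             lastChar.islower() and c.isupper(),  # previous char was lower and this is upper
--             lastChar.isnumeric() and c.isalpha(),  # previous char was a number and this is a letter
--             lastChar.isalpha() and c.isnumeric(),  # previous char was a letter and this is a number
--         ]):
--             processed += "_"
--         # Append char
--         processed += c
--         # Store last char
--         lastChar = c
--     name = processed
--     # Remove non-word characters
--     processed = ""
--     for c in name:
--         if c.isidentifier() or c.isdecimal():
--             processed += c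
--         else:
--             processed += "_"
--     name = processed
--     # Split by underscore
--     name = name.split("_")
--     name = [word for word in name if len(word)]
--     # Remove numbers from start
--     while name[0].isnumeric():
--         name = name[1:]
--     # Process each word
--     processed = []
--     for i, word in enumerate(name):
--         # Handle case
--         word = word.lower()
--         if case in ("upper"):
--             word = word.upper()
--         if case in ("title", "camel"):
--             if case == "camel" and i == 0:
--                 word = word.lower()
--             else:
--                 word = word.title()
--         if case in ("snake", "lower"):
--             word = word.lower()
--         # Append word
--         processed.append(word)
--     name = processed
--     # Recombine
--     if case == "snake":
--         name = "_".join(name)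
--     else:
--         name = "".join(name)
--     # Add special underscores
--     if private:
--         # If private, prepend _
--         name = "_" + name
--     if protected:
--         # If also protected, prepend another _
--         name = "_" + name
--     if core:
--         # If styled like a core variable (e.g. __file__), append __
--         name = name + "__"
--     return name
-- ===== SOURCE B (Python) =====
-- def _styleWord(case, i, word):
--     word = word.upper() if case in "upper" else word.lower()
--     if case == "camel" and i == 0:
--         return word
--     if case in ("title", "camel"):
--         return word.title()
--     return word.lower() if case in ("snake", "lower") else word
--
--
-- def makeValidVarName(name, case="camel"):
--     private = name.startswith("_")
--     protected = name.startswith("__")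
--     core = name.endswith("__")
--     # One forward scan: build the word list directly, flushing the buffer at
--     # separators and at lower/upper, letter/number boundaries. A char is kept
--     # exactly when the original keeps it (isidentifier/isdecimal), except the
--     # explicit separators ' ', '.', ',' and '_' themselves, which split words.
--     words = []
--     buf = ""
--     prev = ""
--     for c in name:
--         if c == "_" or c in " .," or not (c.isidentifier() or c.isdecimal()):
--             # separator: flush the current word
--             if buf:
--                 words.append(buf)
--             buf = ""
--         else:
--             if (prev.islower() and c.isupper()) or \
--                (prev.isnumeric() and c.isalpha()) or \
--                (prev.isalpha() and c.isnumeric()):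
--                 if buf:
--                     words.append(buf)
--                 buf = ""
--             buf += c
--         prev = c
--     if buf:
--         words.append(buf)
--     # Drop numeric words from the start (returns '' when none survive, where A raises)
--     while words and words[0].isnumeric():
--         words = words[1:]
--     styled = [_styleWord(case, i, w) for i, w in enumerate(words)]
--     return ("_" * private) + ("_" * protected) + \
--         ("_" if case == "snake" else "").join(styled) + ("__" * core)
-- ===== Notes on version B (the rewrite author's own statement) =====
-- stated objective: alternative
-- what changed: Replaces A's three sequential string passes (boundary-marker insertion into a new string, non-word-to-underscore mapping, split on underscore plus empty-drop) by ONE forward scan that builds the word list directly with a current-word buffer flushed at separators and case/digit boundaries, using the same per-char Unicode tests as A; word styling is factored into a helper and the underscore prefixes/suffix are composed arithmetically.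
import Mathlib
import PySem

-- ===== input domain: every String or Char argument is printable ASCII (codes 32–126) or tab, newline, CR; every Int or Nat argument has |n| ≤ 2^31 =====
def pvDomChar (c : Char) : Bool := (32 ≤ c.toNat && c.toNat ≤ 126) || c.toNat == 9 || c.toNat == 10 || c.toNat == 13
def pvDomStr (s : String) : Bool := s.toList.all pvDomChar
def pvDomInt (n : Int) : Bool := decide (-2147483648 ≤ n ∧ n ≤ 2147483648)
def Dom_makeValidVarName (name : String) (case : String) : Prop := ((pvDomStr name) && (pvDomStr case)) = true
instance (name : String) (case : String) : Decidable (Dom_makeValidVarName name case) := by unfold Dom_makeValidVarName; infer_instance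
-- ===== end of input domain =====

-- B replaces A's three string passes (boundary-marking, non-word→'_', split on '_')
-- by one forward scan building the word list directly, using A's own per-char tests;
-- return-value equivalence is proved on Pre_ (elsewhere Python A raises IndexError).


-- ===== PORT A =====
-- Shared single-char classification helper: both Pythons contain this exact
-- three-clause test ('lastChar'/'prev' is "" before the first iteration → Option).
-- c.isnumeric()/c.isdecimal() coincide with c.isdigit() on the ASCII domain.
def pvBoundary (prev : Option Char) (c : Char) : Bool :=
  match prev with
  | none => false
  | some p =>
      (PySem.Chars.islower p && PySem.Chars.isupper c) ||
      (PySem.Chars.isdigit p && PySem.Chars.isalpha c) ||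
      (PySem.Chars.isalpha p && PySem.Chars.isdigit c)

-- word.title(), ported by hand (exact on ASCII: a letter after a non-letter is
-- uppercased, a letter after a letter is lowercased, other chars unchanged)
def pyTitleGo (prevAlpha : Bool) : List Char → List Char
  | [] => []
  | c :: rest =>
      (if PySem.Chars.isalpha c then
        (if prevAlpha then PySem.Chars.lowerChar c else PySem.Chars.upperChar c)
       else c) :: pyTitleGo (PySem.Chars.isalpha c) rest

def pyTitle (w : List Char) : List Char := pyTitleGo false w

-- word.isnumeric() on ASCII words: nonempty and all digits
def pvIsNumericW (w : List Char) : Bool := !w.isEmpty && w.all PySem.Chars.isdigit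

-- the numeric-word drop loop, shared by both ports: A's unguarded while-loop
-- (Python raises IndexError on the empty list — excluded by Pre_; we return []
-- there) and B's guarded while-loop are the same total recursion here
def pvDropNum : List (List Char) → List (List Char)
  | [] => []
  | w :: ws => if pvIsNumericW w then pvDropNum ws else w :: ws

-- A's per-word case handling ('case in ("upper")' is Python's SUBSTRING test)
def pvCaseWordA (case : List Char) (i : Int) (word : List Char) : List Char :=
  let w1 := PySem.Chars.lower word
  let w2 := if PySem.Chars.isIn case ("upper".toList) then PySem.Chars.upper w1 else w1
  let w3 := if case = "title".toList ∨ case = "camel".toList then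
      (if case = "camel".toList ∧ i = 0 then PySem.Chars.lower w2 else pyTitle w2)
    else w2
  if case = "snake".toList ∨ case = "lower".toList then PySem.Chars.lower w3 else w3

def makeValidVarName (name : String) (case : String) : String :=
  let priv := PySem.Str.startswith name "_"
  let prot := PySem.Str.startswith name "__"
  let core := PySem.Str.endswith name "__"
  -- replace all different wordbreaks with _
  let cs := [' ', '.', ','].foldl (fun s wb => PySem.Chars.replace s [wb] ['_']) name.toList
  -- insert a _ between lower/upper pairs and char/number pairs
  let p1 := (cs.foldl
      (fun (st : List Char × Option Char) c =>
        ((if pvBoundary st.2 c then st.1 ++ ['_'] else st.1) ++ [c], some c))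
      ([], none)).1
  -- remove non-word characters (c.isidentifier() on one ASCII char = letter or '_')
  let p2 := p1.foldl
      (fun acc c => acc ++ [if (PySem.Chars.isalpha c || c == '_') || PySem.Chars.isdigit c then c else '_']) []
  -- split by underscore, keep nonempty words
  let ws := (PySem.Chars.splitOn p2 ['_']).filter (fun w => w.length != 0)
  -- remove numbers from start
  let ws := pvDropNum ws
  -- process each word
  let processed := (PySem.List.enumerate ws).foldl
      (fun acc iw => acc ++ [pvCaseWordA case.toList iw.1 iw.2]) []
  -- recombine
  let res := if case = "snake" then PySem.Chars.join ['_'] processed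
             else PySem.Chars.join [] processed
  -- add special underscores
  let res := if priv then '_' :: res else res
  let res := if prot then '_' :: res else res
  let res := if core then res ++ ['_', '_'] else res
  String.mk res

-- ===== PORT B =====
-- B's separator test, as Source B writes it:
-- c == "_" or c in " .," or not (c.isidentifier() or c.isdecimal())
-- (single-char isidentifier on the ASCII domain = letter or '_', as in port A)
def pvSepB (c : Char) : Bool :=
  (c == '_' || PySem.Chars.isIn [c] [' ', '.', ',']) ||
  !((PySem.Chars.isalpha c || c == '_') || PySem.Chars.isdigit c)

-- B's word styling helper
def pvStyleWord (case : List Char) (i : Int) (word : List Char) : List Char :=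
  let w := if PySem.Chars.isIn case ("upper".toList) then PySem.Chars.upper word
           else PySem.Chars.lower word
  if case = "camel".toList ∧ i = 0 then w
  else if case = "title".toList ∨ case = "camel".toList then pyTitle w
  else if case = "snake".toList ∨ case = "lower".toList then PySem.Chars.lower w
  else w

def makeValidVarName_alt (name : String) (case : String) : String :=
  let priv := PySem.Str.startswith name "_"
  let prot := PySem.Str.startswith name "__"
  let core := PySem.Str.endswith name "__"
  -- one forward scan: state = (words, buf, prev)
  let st := name.toList.foldl
      (fun (st : List (List Char) × List Char × Option Char) c =>
        if pvSepB c then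
          ((if st.2.1 ≠ [] then st.1 ++ [st.2.1] else st.1), [], some c)
        else if pvBoundary st.2.2 c then
          ((if st.2.1 ≠ [] then st.1 ++ [st.2.1] else st.1), [c], some c)
        else (st.1, st.2.1 ++ [c], some c))
      ([], [], none)
  let words := if st.2.1 ≠ [] then st.1 ++ [st.2.1] else st.1
  let words := pvDropNum words
  let styled := (PySem.List.enumerate words).map (fun iw => pvStyleWord case.toList iw.1 iw.2)
  String.mk ((if priv then ['_'] else []) ++ (if prot then ['_'] else []) ++
    PySem.Chars.join (if case = "snake" then ['_'] else []) styled ++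
    (if core then ['_', '_'] else []))

-- ===== PRECONDITION & SPEC =====
-- Pre_ excludes exactly the inputs, within the ASCII domain Dom_ that every theorem
-- assumes, on which Python A raises IndexError: names containing no letter, so that
-- every word produced by the split is numeric (or there is no word at all) and A's
-- numeric-strip while-loop indexes the empty list.
def Pre_makeValidVarName (name : String) (case : String) : Prop :=
  name.toList.any (fun c => PySem.Chars.isalpha c) = true
instance (name : String) (case : String) : Decidable (Pre_makeValidVarName name case) := by
  unfold Pre_makeValidVarName; infer_instance

def pvWitness_makeValidVarName : String × String := ("hello worldIX", "snake")

def Spec_makeValidVarName (name : String) (case : String) (out : String) : Prop := out = makeValidVarName_alt name case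
instance (name : String) (case : String) (out : String) : Decidable (Spec_makeValidVarName name case out) := by unfold Spec_makeValidVarName; infer_instance

-- ===== CLAIM (what is proved, stated in full; the proofs are below) =====
def Claim_equal_makeValidVarName : Prop := ∀ (name : String) (case : String), Dom_makeValidVarName name case → Pre_makeValidVarName name case → Spec_makeValidVarName name case (makeValidVarName name case)

-- ===== LEMMAS AND PROOFS =====

-- ---- spec-level machinery ----
def pvRepl (c : Char) : Char := if c = ' ' ∨ c = '.' ∨ c = ',' then '_' else c
def pvSep (c : Char) : Bool := !(PySem.Chars.isalpha c || PySem.Chars.isdigit c)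
def pvKeep (c : Char) : Char :=
  if (PySem.Chars.isalpha c || c == '_') || PySem.Chars.isdigit c then c else '_'

def pvEmit1 (prev : Option Char) (c : Char) : List Char :=
  (if pvBoundary prev c then ['_'] else []) ++ [c]
def pvEmitAll1 (prev : Option Char) : List Char → List Char
  | [] => []
  | c :: rest => pvEmit1 prev c ++ pvEmitAll1 (some c) rest

def pvEmit (prev : Option Char) (c : Char) : List Char :=
  (if pvBoundary prev c then ['_'] else []) ++ [if pvSep c then '_' else c]
def pvEmitAll (prev : Option Char) : List Char → List Char
  | [] => []
  | c :: rest => pvEmit prev c ++ pvEmitAll (some c) rest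

def pvSplitAcc (buf : List Char) : List Char → List (List Char)
  | [] => [buf]
  | c :: rest => if c = '_' then buf :: pvSplitAcc [] rest else pvSplitAcc (buf ++ [c]) rest

-- B's separator test agrees with 'not (letter or digit)' on every char
theorem pvSepB_eq (c : Char) : pvSepB c = pvSep c := by
  by_cases h : c = ' ' ∨ c = '.' ∨ c = ',' ∨ c = '_'
  · rcases h with h | h | h | h <;> subst h <;> decide
  · push_neg at h
    obtain ⟨h1, h2, h3, h4⟩ := h
    have hin : PySem.Chars.isIn [c] [' ', '.', ','] = false := by
      rw [PySem.Chars.isIn_eq_false_iff]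
      intro hinf
      have := hinf.subset (List.mem_singleton_self c)
      simp only [List.mem_cons, List.not_mem_nil, or_false] at this
      rcases this with h | h | h <;> [exact h1 h; exact h2 h; exact h3 h]
    have hu : (c == '_') = false := by simp [h4]
    simp [pvSepB, pvSep, hin, hu]

-- ---- phase 0: the three single-char replaces are one char map ----
theorem pvReplaceGo_single (a b : Char) (fuel : Nat) :
    ∀ (l acc : List Char), l.length ≤ fuel →
      PySem.Chars.replace.go [a] [b] fuel l acc
        = acc.reverse ++ l.map (fun c => if c = a then b else c) := by
  induction fuel with
  | zero =>
    intro l acc h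
    have : l = [] := List.length_eq_zero_iff.mp (Nat.le_zero.mp h)
    subst this
    simp [PySem.Chars.replace.go]
  | succ n ih =>
    intro l acc h
    cases l with
    | nil => simp [PySem.Chars.replace.go]
    | cons c t =>
      simp only [PySem.Chars.replace.go, List.isPrefixOf, List.length_cons] at *
      by_cases hc : a = c
      · subst hc
        simp only [beq_self_eq_true, Bool.true_and, if_true, List.length_nil, List.drop_succ_cons,
          List.drop_zero, List.reverse_singleton, List.singleton_append]
        rw [ih t (b :: acc) (by omega)]
        simp
      · have hbc : (a == c) = false := by simp [hc]
        simp only [hbc, Bool.false_and, Bool.false_eq_true, if_false]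
        rw [ih t (c :: acc) (by omega)]
        simp [Ne.symm hc]

theorem pvReplace_single (a b : Char) (s : List Char) :
    PySem.Chars.replace s [a] [b] = s.map (fun c => if c = a then b else c) := by
  rw [PySem.Chars.replace]
  simp only [List.isEmpty_cons, if_false, Bool.false_eq_true]
  rw [pvReplaceGo_single a b s.length s [] (le_refl _)]
  simp

theorem pvPhase0 (cs : List Char) :
    [' ', '.', ','].foldl (fun s wb => PySem.Chars.replace s [wb] ['_']) cs
      = cs.map pvRepl := by
  simp only [List.foldl_cons, List.foldl_nil, pvReplace_single, List.map_map]
  apply List.map_congr_left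
  intro c _
  simp only [Function.comp_apply, pvRepl]
  split_ifs with h1 h2 h3 h4 h5 h6 h7 <;> simp_all

-- ---- phase 1 fold ----
theorem pvPhase1 (l : List Char) (acc : List Char) (prev : Option Char) :
    (l.foldl (fun (st : List Char × Option Char) c =>
        ((if pvBoundary st.2 c then st.1 ++ ['_'] else st.1) ++ [c], some c)) (acc, prev)).1
      = acc ++ pvEmitAll1 prev l := by
  induction l generalizing acc prev with
  | nil => simp [pvEmitAll1]
  | cons c t ih =>
    simp only [List.foldl_cons]
    rw [ih]
    simp only [pvEmitAll1, pvEmit1]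
    split_ifs <;> simp

-- ---- classification invariance under pvRepl, and emit composition ----
theorem pvClass_repl (c : Char) :
    PySem.Chars.islower (pvRepl c) = PySem.Chars.islower c ∧
    PySem.Chars.isupper (pvRepl c) = PySem.Chars.isupper c ∧
    PySem.Chars.isdigit (pvRepl c) = PySem.Chars.isdigit c := by
  unfold pvRepl
  split_ifs with h
  · rcases h with h | h | h <;> subst h <;> exact ⟨by decide, by decide, by decide⟩
  · exact ⟨rfl, rfl, rfl⟩

theorem pvBoundary_repl (p : Option Char) (c : Char) :
    pvBoundary (p.map pvRepl) (pvRepl c) = pvBoundary p c := by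
  cases p with
  | none => rfl
  | some p =>
    obtain ⟨h1, h2, h3⟩ := pvClass_repl p
    obtain ⟨h1', h2', h3'⟩ := pvClass_repl c
    simp [pvBoundary, PySem.Chars.isalpha, h1, h2, h3, h1', h2', h3']

theorem pvKeep_repl (c : Char) :
    pvKeep (pvRepl c) = if pvSep c then '_' else c := by
  by_cases hw : c = ' ' ∨ c = '.' ∨ c = ','
  · rcases hw with h | h | h <;> subst h <;> decide
  · have hr : pvRepl c = c := by simp [pvRepl, hw]
    rw [hr]
    by_cases hu : c = '_'
    · subst hu; decide
    · have hub : (c == '_') = false := by simp [hu]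
      cases h : (PySem.Chars.isalpha c || PySem.Chars.isdigit c) with
      | false =>
        have h' := h
        simp only [Bool.or_eq_false_iff] at h'
        simp [pvKeep, pvSep, hub, h'.1, h'.2, h]
      | true => simp [pvKeep, pvSep, hub, h]

theorem pvEmitCompose (l : List Char) (prev : Option Char) :
    (pvEmitAll1 (prev.map pvRepl) (l.map pvRepl)).map pvKeep = pvEmitAll prev l := by
  induction l generalizing prev with
  | nil => rfl
  | cons c t ih =>
    simp only [List.map_cons, pvEmitAll1, pvEmitAll, List.map_append]
    have ht := ih (prev := some c)
    simp only [Option.map_some] at ht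
    rw [ht]
    congr 1
    rw [pvEmit1, pvEmit, pvBoundary_repl]
    have hk : pvKeep '_' = '_' := by decide
    by_cases hb : pvBoundary prev c = true <;> simp [hb, hk, pvKeep_repl]

-- ---- split on '_' ----
theorem pvSplitOnGo (fuel : Nat) :
    ∀ (l cur : List Char) (acc : List (List Char)), l.length ≤ fuel →
      PySem.Chars.splitOn.go ['_'] fuel l cur acc
        = acc.reverse ++ pvSplitAcc cur.reverse l := by
  induction fuel with
  | zero =>
    intro l cur acc h
    have : l = [] := List.length_eq_zero_iff.mp (Nat.le_zero.mp h)
    subst this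
    simp [PySem.Chars.splitOn.go, pvSplitAcc]
  | succ n ih =>
    intro l cur acc h
    cases l with
    | nil => simp [PySem.Chars.splitOn.go, pvSplitAcc]
    | cons c t =>
      simp only [PySem.Chars.splitOn.go, List.isPrefixOf, List.length_cons] at *
      by_cases hc : c = '_'
      · subst hc
        simp only [beq_self_eq_true, Bool.true_and, if_true, List.length_nil,
          List.drop_succ_cons, List.drop_zero]
        rw [ih t [] (cur.reverse :: acc) (by omega)]
        simp [pvSplitAcc]
      · have hbc : ('_' == c) = false := by simp [Ne.symm hc]
        simp only [hbc, Bool.false_and, Bool.false_eq_true, if_false]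
        rw [ih t (c :: cur) acc (by omega)]
        simp [pvSplitAcc, hc]

theorem pvSplitOn_eq (s : List Char) :
    PySem.Chars.splitOn s ['_'] = pvSplitAcc [] s := by
  rw [PySem.Chars.splitOn]
  rw [pvSplitOnGo (s.length + 1) s [] [] (by omega)]
  simp

-- ---- B's scan computes split-filter of the emitted stream ----
theorem pvSep_boundary (c : Char) (prev : Option Char) (h : pvSep c = true) :
    pvBoundary prev c = false := by
  cases prev with
  | none => rfl
  | some p =>
    simp only [pvSep, Bool.not_eq_eq_eq_not, Bool.not_true, Bool.or_eq_false_iff] at h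
    have hu : PySem.Chars.isupper c = false := by
      have := h.1
      simp only [PySem.Chars.isalpha, Bool.or_eq_false_iff] at this
      exact this.1
    simp [pvBoundary, h.1, h.2, hu]

def pvFinal (st : List (List Char) × List Char × Option Char) : List (List Char) :=
  if st.2.1 ≠ [] then st.1 ++ [st.2.1] else st.1

theorem pvScan (l : List Char) (words : List (List Char)) (buf : List Char) (prev : Option Char) :
    pvFinal
      (l.foldl
        (fun (st : List (List Char) × List Char × Option Char) c =>
          if pvSepB c then
            ((if st.2.1 ≠ [] then st.1 ++ [st.2.1] else st.1), [], some c)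
          else if pvBoundary st.2.2 c then
            ((if st.2.1 ≠ [] then st.1 ++ [st.2.1] else st.1), [c], some c)
          else (st.1, st.2.1 ++ [c], some c))
        (words, buf, prev))
      = words ++ (pvSplitAcc buf (pvEmitAll prev l)).filter (fun w => w.length != 0) := by
  induction l generalizing words buf prev with
  | nil =>
    by_cases hb : buf = [] <;>
      simp [pvFinal, List.foldl_nil, pvEmitAll, pvSplitAcc, List.filter, hb, List.length_eq_zero_iff]
  | cons c t ih =>
    simp only [List.foldl_cons, pvSepB_eq]
    simp only [pvSepB_eq] at ih
    by_cases h1 : (PySem.Chars.isalpha c || PySem.Chars.isdigit c) = true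
    · -- not a separator
      have hsep : pvSep c = false := by simp [pvSep, h1]
      have hne : c ≠ '_' := by
        intro hc; subst hc; revert h1; decide
      simp only [hsep, Bool.false_eq_true, if_false]
      by_cases h2 : pvBoundary prev c = true
      · simp only [h2, if_true]
        rw [ih]
        simp only [pvEmitAll, pvEmit, h2, if_true, hsep, Bool.false_eq_true, if_false,
          List.singleton_append, List.cons_append, List.nil_append]
        rw [pvSplitAcc, if_pos rfl, pvSplitAcc, if_neg hne]
        simp only [List.nil_append]
        by_cases hb : buf = []
        · simp [hb, List.filter]
        · have hbl : (buf.length != 0) = true := by simpa [List.length_eq_zero_iff] using hb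
          simp [hb, List.filter, hbl]
      · have h2' : pvBoundary prev c = false := by simp [h2]
        simp only [h2, if_false]
        rw [ih]
        simp only [pvEmitAll, pvEmit, h2', Bool.false_eq_true, if_false, hsep,
          List.nil_append, List.singleton_append]
        rw [pvSplitAcc, if_neg hne]
    · -- separator: flush
      have hsep : pvSep c = true := by simp [pvSep]; simpa using h1
      have hbd : pvBoundary prev c = false := pvSep_boundary c prev hsep
      simp only [hsep, if_true]
      rw [ih]
      simp only [pvEmitAll, pvEmit, hbd, Bool.false_eq_true, if_false, hsep, if_true,
        List.nil_append, List.singleton_append]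
      rw [pvSplitAcc, if_pos rfl]
      by_cases hb : buf = []
      · simp [hb, List.filter]
      · have hbl : (buf.length != 0) = true := by simpa [List.length_eq_zero_iff] using hb
        simp [hb, List.filter, hbl]

theorem pvToNat_ofNat (n : Nat) (h : n < 55296) : (Char.ofNat n).toNat = n := by
  unfold Char.ofNat
  rw [dif_pos (Or.inl h)]
  simp [Char.ofNatAux, Char.toNat]

theorem pvIsupper_iff (c : Char) : PySem.Chars.isupper c = true ↔ 65 ≤ c.toNat ∧ c.toNat ≤ 90 := by
  rw [PySem.Chars.isupper]
  rw [Bool.and_eq_true, decide_eq_true_iff, decide_eq_true_iff, Char.le_def, Char.le_def]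
  rw [UInt32.le_iff_toNat_le, UInt32.le_iff_toNat_le]
  simp only [Char.toNat_val]
  constructor <;> intro h <;> exact ⟨h.1, h.2⟩

theorem pvIslower_iff (c : Char) : PySem.Chars.islower c = true ↔ 97 ≤ c.toNat ∧ c.toNat ≤ 122 := by
  rw [PySem.Chars.islower]
  rw [Bool.and_eq_true, decide_eq_true_iff, decide_eq_true_iff, Char.le_def, Char.le_def]
  rw [UInt32.le_iff_toNat_le, UInt32.le_iff_toNat_le]
  simp only [Char.toNat_val]
  constructor <;> intro h <;> exact ⟨h.1, h.2⟩

theorem pvLowerChar_eq_of_upper (c : Char) (hU : PySem.Chars.isupper c = true) :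
    PySem.Chars.lowerChar c = Char.ofNat (c.toNat + 32) := by
  rw [PySem.Chars.lowerChar, if_pos hU]

theorem pvLowerChar_idem (c : Char) : PySem.Chars.lowerChar (PySem.Chars.lowerChar c) = PySem.Chars.lowerChar c := by
  by_cases hU : PySem.Chars.isupper c = true
  · obtain ⟨h1, h2⟩ := (pvIsupper_iff c).mp hU
    rw [pvLowerChar_eq_of_upper c hU]
    rw [PySem.Chars.lowerChar, if_neg ?_]
    intro hcon
    obtain ⟨g1, g2⟩ := (pvIsupper_iff _).mp hcon
    rw [pvToNat_ofNat _ (by omega)] at g1 g2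
    omega
  · have h0 : PySem.Chars.lowerChar c = c := by rw [PySem.Chars.lowerChar, if_neg hU]
    rw [h0, h0]

theorem pvUpperChar_lowerChar (c : Char) : PySem.Chars.upperChar (PySem.Chars.lowerChar c) = PySem.Chars.upperChar c := by
  by_cases hU : PySem.Chars.isupper c = true
  · obtain ⟨h1, h2⟩ := (pvIsupper_iff c).mp hU
    rw [pvLowerChar_eq_of_upper c hU]
    rw [PySem.Chars.upperChar, if_pos ?lo]
    case lo =>
      rw [pvIslower_iff]
      rw [pvToNat_ofNat _ (by omega)]
      omega
    conv_rhs => rw [PySem.Chars.upperChar]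
    rw [if_neg ?nl]
    case nl =>
      intro hcon
      obtain ⟨g1, g2⟩ := (pvIslower_iff c).mp hcon
      omega
    rw [pvToNat_ofNat _ (by omega)]
    have h32 : c.toNat + 32 - 32 = c.toNat := by omega
    rw [h32, Char.ofNat_toNat]
  · rw [PySem.Chars.lowerChar, if_neg hU]

theorem pvLower_idem (w : List Char) : PySem.Chars.lower (PySem.Chars.lower w) = PySem.Chars.lower w := by
  simp only [PySem.Chars.lower, List.map_map]
  apply List.map_congr_left
  intro c _
  simp [Function.comp_apply, pvLowerChar_idem]

theorem pvUpper_lower (w : List Char) : PySem.Chars.upper (PySem.Chars.lower w) = PySem.Chars.upper w := by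
  simp only [PySem.Chars.upper, PySem.Chars.lower, List.map_map]
  apply List.map_congr_left
  intro c _
  simp [Function.comp_apply, pvUpperChar_lowerChar]

theorem pvStyle_eq (case : List Char) (i : Int) (w : List Char) :
    pvCaseWordA case i w = pvStyleWord case i w := by
  unfold pvCaseWordA pvStyleWord
  by_cases h1 : case = ['c','a','m','e','l']
  · subst h1
    have hsub : PySem.Chars.isIn ['c','a','m','e','l'] ['u','p','p','e','r'] = false := by decide
    have hts : ¬(['c','a','m','e','l'] = ['t','i','t','l','e'] : Prop) := by decide
    have hsn : ¬(['c','a','m','e','l'] = ['s','n','a','k','e'] : Prop) := by decide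
    have hlw : ¬(['c','a','m','e','l'] = ['l','o','w','e','r'] : Prop) := by decide
    by_cases hi : i = 0
    · simp [hsub, hts, hsn, hlw, hi, pvLower_idem]
    · simp [hsub, hts, hsn, hlw, hi]
  · by_cases h2 : case = ['t','i','t','l','e']
    · subst h2
      have hsub : PySem.Chars.isIn ['t','i','t','l','e'] ['u','p','p','e','r'] = false := by decide
      have hcm : ¬(['t','i','t','l','e'] = ['c','a','m','e','l'] : Prop) := by decide
      have hsn : ¬(['t','i','t','l','e'] = ['s','n','a','k','e'] : Prop) := by decide
      have hlw : ¬(['t','i','t','l','e'] = ['l','o','w','e','r'] : Prop) := by decide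
      simp [hsub, hcm, hsn, hlw]
    · by_cases h3 : case = ['s','n','a','k','e']
      · subst h3
        have hsub : PySem.Chars.isIn ['s','n','a','k','e'] ['u','p','p','e','r'] = false := by decide
        have hcm : ¬(['s','n','a','k','e'] = ['c','a','m','e','l'] : Prop) := by decide
        have hts : ¬(['s','n','a','k','e'] = ['t','i','t','l','e'] : Prop) := by decide
        simp [hsub, hcm, hts, pvLower_idem]
      · by_cases h4 : case = ['l','o','w','e','r']
        · subst h4
          have hsub : PySem.Chars.isIn ['l','o','w','e','r'] ['u','p','p','e','r'] = false := by decide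
          have hcm : ¬(['l','o','w','e','r'] = ['c','a','m','e','l'] : Prop) := by decide
          have hts : ¬(['l','o','w','e','r'] = ['t','i','t','l','e'] : Prop) := by decide
          have hsn : ¬(['l','o','w','e','r'] = ['s','n','a','k','e'] : Prop) := by decide
          simp [hsub, hcm, hts, hsn, pvLower_idem]
        · simp [h1, h2, h3, h4]
          split_ifs <;> simp [pvUpper_lower]

-- ===== VERDICT (by name: the statements are the Claim_ definitions above) =====
theorem makeValidVarName_spec : Claim_equal_makeValidVarName := by
  intro name case _ _
  unfold Spec_makeValidVarName makeValidVarName makeValidVarName_alt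
  dsimp only []
  rw [pvPhase0, pvPhase1]
  rw [PySem.List.foldl_append_singleton_eq_map, PySem.List.foldl_append_singleton_eq_map]
  simp only [List.nil_append]
  have hcomp : (pvEmitAll1 none (List.map pvRepl name.toList)).map pvKeep
      = pvEmitAll none name.toList := by simpa using pvEmitCompose name.toList none
  rw [show (fun c => if (PySem.Chars.isalpha c || c == '_') || PySem.Chars.isdigit c then c else '_') = pvKeep from rfl]
  rw [hcomp, pvSplitOn_eq]
  have hfin : ∀ st : List (List Char) × List Char × Option Char,
      (if st.2.1 ≠ [] then st.1 ++ [st.2.1] else st.1) = pvFinal st := fun _ => rfl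
  rw [hfin, pvScan]
  simp only [List.nil_append]
  rw [List.map_congr_left (fun iw _ => pvStyle_eq case.toList iw.1 iw.2)]
  by_cases hs : case = "snake" <;>
    by_cases hpriv : PySem.Chars.startswith name.toList ['_'] = true <;>
    by_cases hprot : PySem.Chars.startswith name.toList ['_', '_'] = true <;>
    by_cases hcore : PySem.Chars.endswith name.toList ['_', '_'] = true <;>
    simp [hs, hpriv, hprot, hcore]
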